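-- pv_equiv track=rewrite | github.com/nclement/cvc-scripts | alignment/PyMolAligner.py | _getAlignmentList
-- ===== SOURCE A (Python) =====
-- def _getAlignmentList(str1, str2):
--   """Get the alignment mapping from str1 (gold) => str2 (test). At the end,
--   len(alns) == len(goldp)
--   """
--   alns = []
--   idx1 = 0
--   idx2 = 0
--   for i in range(len(str1)):
--     c1 = str1[i]
--     c2 = str2[i]
--
--     if c2 == '-':
--       # Aligned with a gap in test; place a -1
--       alns.append(-1)
--       idx1 += 1
--     elif c1 == '-':
--       # Aligned with a gap in gold; just skip.
--       idx2 += 1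
--       continue
--     else:
--       # Good on both top and bottom.
--       alns.append(idx2)
--       idx1 += 1
--       idx2 += 1
--   return alns
-- ===== SOURCE B (Python) =====
-- def _getAlignmentList(str1, str2):
--   """Two-pass version: first a prefix table of running test indices, then a
--   filter/map pass over the gold string."""
--   n = len(str1)
--   test_idx = []
--   run = 0
--   for i in range(n):
--     test_idx.append(run)
--     if str2[i] != '-':
--       run += 1
--   return [-1 if str2[i] == '-' else test_idx[i]
--           for i in range(n)
--           if str2[i] == '-' or str1[i] != '-']
-- ===== Notes on version B (the rewrite author's own statement) =====
-- stated objective: alternative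
-- what changed: Replaces the single interleaved loop with two running counters by two passes: a prefix table test_idx[i] = number of non-gap test positions before i, then a filter/map comprehension over the gold string; trades the stateful loop for table lookups.
import Mathlib
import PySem

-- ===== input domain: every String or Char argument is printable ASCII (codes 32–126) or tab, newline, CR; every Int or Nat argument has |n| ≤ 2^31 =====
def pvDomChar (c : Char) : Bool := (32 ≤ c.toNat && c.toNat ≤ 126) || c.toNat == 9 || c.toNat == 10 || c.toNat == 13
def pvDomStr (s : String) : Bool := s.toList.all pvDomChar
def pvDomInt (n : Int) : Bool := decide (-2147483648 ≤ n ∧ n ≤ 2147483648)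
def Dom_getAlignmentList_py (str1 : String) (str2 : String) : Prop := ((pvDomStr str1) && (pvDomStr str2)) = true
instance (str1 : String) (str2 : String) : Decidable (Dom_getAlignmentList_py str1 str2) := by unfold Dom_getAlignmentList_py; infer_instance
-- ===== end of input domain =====

-- B replaces A's single stateful loop by a prefix-table pass plus a filter/map pass (objective: alternative decomposition).

-- ===== PORT A =====
-- literal port of A's loop: state (alns, idx1, idx2) over i in range(len(str1))
def getAlignmentList_py (str1 : String) (str2 : String) : List Int :=
  let l1 := str1.toList
  let l2 := str2.toList
  ((PySem.List.pyRange 0 (l1.length : Int) 1).foldl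
    (fun (st : List Int × Int × Int) i =>
      let c1 := PySem.List.pyGetD l1 i ' '
      let c2 := PySem.List.pyGetD l2 i ' '
      if c2 = '-' then (st.1 ++ [(-1 : Int)], st.2.1 + 1, st.2.2)
      else if c1 = '-' then (st.1, st.2.1, st.2.2 + 1)
      else (st.1 ++ [st.2.2], st.2.1 + 1, st.2.2 + 1))
    ([], 0, 0)).1

-- ===== PORT B =====
-- literal port of Source B: build test_idx (state (test_idx, run)), then a filter/map over range(len(str1))
def getAlignmentList_py_alt (str1 : String) (str2 : String) : List Int :=
  let l1 := str1.toList
  let l2 := str2.toList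
  let t := (PySem.List.pyRange 0 (l1.length : Int) 1).foldl
    (fun (st : List Int × Int) i =>
      let st' := (st.1 ++ [st.2], st.2)
      if PySem.List.pyGetD l2 i ' ' ≠ '-' then (st'.1, st'.2 + 1) else st')
    ([], 0)
  let testIdx := t.1
  ((PySem.List.pyRange 0 (l1.length : Int) 1).filter (fun i =>
      (PySem.List.pyGetD l2 i ' ' == '-') || (PySem.List.pyGetD l1 i ' ' != '-'))).map
    (fun i => if PySem.List.pyGetD l2 i ' ' = '-' then (-1 : Int)
              else PySem.List.pyGetD testIdx i 0)

-- ===== PRECONDITION & SPEC =====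
-- Pre_ excludes str2 shorter than str1, where A (and B) raise IndexError on str2[i].
def Pre_getAlignmentList_py (str1 : String) (str2 : String) : Prop :=
  str1.toList.length ≤ str2.toList.length
instance (str1 : String) (str2 : String) : Decidable (Pre_getAlignmentList_py str1 str2) := by
  unfold Pre_getAlignmentList_py; infer_instance

def pvWitness_getAlignmentList_py : String × String := ("a-b", "ab-")

def Spec_getAlignmentList_py (str1 : String) (str2 : String) (out : List Int) : Prop := out = getAlignmentList_py_alt str1 str2
instance (str1 : String) (str2 : String) (out : List Int) : Decidable (Spec_getAlignmentList_py str1 str2 out) := by unfold Spec_getAlignmentList_py; infer_instance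

-- ===== CLAIM (what is proved, stated in full; the proofs are below) =====
def Claim_equal_getAlignmentList_py : Prop := ∀ (str1 : String) (str2 : String), Dom_getAlignmentList_py str1 str2 → Pre_getAlignmentList_py str1 str2 → Spec_getAlignmentList_py str1 str2 (getAlignmentList_py str1 str2)

-- ===== LEMMAS AND PROOFS =====

-- running test index: number of non-gap chars among the first k of l2
def pvPC (l2 : List Char) (k : Nat) : Int := ((l2.take k).countP (fun c => !(c == '-')) : Int)

theorem pvPC_succ (l2 : List Char) (k : Nat) (hk : k < l2.length) :
    pvPC l2 (k + 1) = if l2[k] = '-' then pvPC l2 k else pvPC l2 k + 1 := by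
  unfold pvPC
  rw [List.take_add_one, List.getElem?_eq_getElem hk]
  rw [List.countP_append]
  split_ifs with h <;> simp [h]

-- B's table fold over range n yields the table of prefix counts and the running count
theorem pvTableB (l2 : List Char) (n : Nat) (hn : n ≤ l2.length) :
    (PySem.List.pyRange 0 (n : Int) 1).foldl
      (fun (st : List Int × Int) i =>
        if PySem.List.pyGetD l2 i ' ' ≠ '-' then (st.1 ++ [st.2], st.2 + 1)
        else (st.1 ++ [st.2], st.2))
      ([], 0)
    = ((List.range n).map (fun k => pvPC l2 k), pvPC l2 n) := by
  induction n with
  | zero => simp [PySem.List.pyRange_one_eq_nil, pvPC]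
  | succ m ih =>
    have hm : m < l2.length := by omega
    have hcast : ((m : Int) + 1) = ((m + 1 : Nat) : Int) := by push_cast; ring
    rw [show ((m + 1 : Nat) : Int) = (m : Int) + 1 by push_cast; ring,
        PySem.List.pyRange_one_succ_right (by positivity), List.foldl_append,
        ih (by omega)]
    simp only [List.foldl_cons, List.foldl_nil, PySem.List.pyGetD_natCast,
      List.getD_eq_getElem?_getD, List.getElem?_eq_getElem hm, Option.getD_some]
    rw [List.range_succ, List.map_append]
    by_cases h : l2[m] = '-'
    · simp [h, pvPC_succ l2 m hm]
    · simp [h, pvPC_succ l2 m hm]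

-- pointwise value of B's second pass
def pvG (l2 : List Char) (i : Int) : Int :=
  if PySem.List.pyGetD l2 i ' ' = '-' then (-1 : Int) else pvPC l2 i.toNat

-- A's fold over range n: the output list is B's filter/map over range n, and idx2 is the prefix count
theorem pvMainA (l1 l2 : List Char) (n : Nat) (h1 : n ≤ l1.length) (h2 : n ≤ l2.length) :
    ((PySem.List.pyRange 0 (n : Int) 1).foldl
      (fun (st : List Int × Int × Int) i =>
        if PySem.List.pyGetD l2 i ' ' = '-' then (st.1 ++ [(-1 : Int)], st.2.1 + 1, st.2.2)
        else if PySem.List.pyGetD l1 i ' ' = '-' then (st.1, st.2.1, st.2.2 + 1)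
        else (st.1 ++ [st.2.2], st.2.1 + 1, st.2.2 + 1))
      ([], 0, 0)).1 = (((PySem.List.pyRange 0 (n : Int) 1).filter (fun i =>
          (PySem.List.pyGetD l2 i ' ' == '-') || (PySem.List.pyGetD l1 i ' ' != '-'))).map
          (pvG l2))
    ∧ ((PySem.List.pyRange 0 (n : Int) 1).foldl
      (fun (st : List Int × Int × Int) i =>
        if PySem.List.pyGetD l2 i ' ' = '-' then (st.1 ++ [(-1 : Int)], st.2.1 + 1, st.2.2)
        else if PySem.List.pyGetD l1 i ' ' = '-' then (st.1, st.2.1, st.2.2 + 1)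
        else (st.1 ++ [st.2.2], st.2.1 + 1, st.2.2 + 1))
      ([], 0, 0)).2.2 = pvPC l2 n := by
  induction n with
  | zero => simp [PySem.List.pyRange_one_eq_nil, pvPC]
  | succ m ih =>
    obtain ⟨ihl, ihc⟩ := ih (by omega) (by omega)
    have hm1 : m < l1.length := by omega
    have hm2 : m < l2.length := by omega
    rw [show ((m + 1 : Nat) : Int) = (m : Int) + 1 by push_cast; ring,
        PySem.List.pyRange_one_succ_right (by positivity)]
    rw [List.foldl_append, List.filter_append, List.map_append]
    have hg2 : PySem.List.pyGetD l2 (m : Int) ' ' = l2[m] := by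
      simp [List.getD_eq_getElem?_getD, List.getElem?_eq_getElem hm2]
    have hg1 : PySem.List.pyGetD l1 (m : Int) ' ' = l1[m] := by
      simp [List.getD_eq_getElem?_getD, List.getElem?_eq_getElem hm1]
    by_cases h2 : l2[m] = '-'
    · refine ⟨?_, ?_⟩
      · simp [hg1, hg2, h2, ihl, pvG]
      · simp [hg2, h2, ihc, pvPC_succ l2 m hm2]
    · by_cases h1c : l1[m] = '-'
      · refine ⟨?_, ?_⟩
        · simp [hg1, hg2, h2, h1c, ihl]
        · simp [hg1, hg2, h2, h1c, ihc, pvPC_succ l2 m hm2]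
      · refine ⟨?_, ?_⟩
        · simp [hg1, hg2, h2, h1c, ihl, ihc, pvG]
        · simp [hg1, hg2, h2, h1c, ihc, pvPC_succ l2 m hm2]

-- ===== VERDICT (by name: the statement is the Claim_ definition above) =====
theorem getAlignmentList_py_spec : Claim_equal_getAlignmentList_py := by
  intro str1 str2 _ hpre
  unfold Spec_getAlignmentList_py getAlignmentList_py getAlignmentList_py_alt
  set l1 := str1.toList
  set l2 := str2.toList
  have hlen : l1.length ≤ l2.length := hpre
  simp only
  rw [(pvMainA l1 l2 l1.length le_rfl hlen).1, pvTableB l2 l1.length hlen]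
  apply List.map_congr_left
  intro i hi
  have hmem := List.mem_filter.mp hi
  have hrange := (PySem.List.mem_pyRange_one).mp hmem.1
  obtain ⟨k, rfl⟩ : ∃ k : Nat, i = (k : Int) := ⟨i.toNat, by omega⟩
  have hk : k < l1.length := by exact_mod_cast hrange.2
  unfold pvG
  split_ifs with h
  · rfl
  · rw [PySem.List.pyGetD_natCast]
    simp [List.getD_eq_getElem?_getD, hk]
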